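-- pv_equiv track=rewrite | github.com/lotharJiang/Question-Answer-System | utils.py | find_raw_answer_position
-- ===== SOURCE A (Python) =====
-- def find_raw_answer_position(para, answer):
--     start = [i for i, v in enumerate(para) if v.lower() == answer[0].lower()]
--     try:
--         for s in start:
--             for e in range(0, len(answer)):
--                 if para[s + e].lower() != answer[e].lower():
--                     break
--
--                 if e == len(answer) - 1:
--                     return s, s + e + 1
--         return None, None
--     except:
--         return None, None
-- ===== SOURCE B (Python) =====
-- def find_raw_answer_position(para, answer):
--     m = len(answer)
--     if m == 0:
--         return None, None
--     pl = [w.lower() for w in para]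
--     al = [w.lower() for w in answer]
--     for i in range(len(pl) - m + 1):
--         if pl[i:i+m] == al:
--             return i, i + m
--     return None, None
-- ===== Notes on version B (the rewrite author's own statement) =====
-- stated objective: simpler
-- what changed: A first builds a candidate list of head-token positions and then re-walks the paragraph token by token under a try/except for control flow; B lowercases both token lists once and does a single left-to-right scan comparing each m-length window slice to the lowered answer, with no candidate pass and no exception handling. (Pre_ excludes non-empty para with empty answer, where A raises IndexError; B returns (None, None) there.)
import Mathlib
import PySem

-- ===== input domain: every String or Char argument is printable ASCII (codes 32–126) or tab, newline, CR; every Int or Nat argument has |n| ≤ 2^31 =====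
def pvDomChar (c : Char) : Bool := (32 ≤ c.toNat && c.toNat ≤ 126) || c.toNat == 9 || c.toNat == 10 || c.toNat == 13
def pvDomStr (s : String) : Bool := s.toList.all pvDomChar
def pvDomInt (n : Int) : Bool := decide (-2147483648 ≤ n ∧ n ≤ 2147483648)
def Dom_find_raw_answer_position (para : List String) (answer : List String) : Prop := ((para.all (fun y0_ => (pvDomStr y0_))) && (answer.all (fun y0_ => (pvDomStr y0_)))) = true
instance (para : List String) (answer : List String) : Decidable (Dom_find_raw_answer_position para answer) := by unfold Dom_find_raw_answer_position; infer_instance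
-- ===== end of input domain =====

-- B replaces A's candidate-list + token-by-token rescans under try/except by one lowercased-window scan; objective: simpler.
-- Outside Pre_ (non-empty para with empty answer) A raises IndexError; B returns (None, None) there.


-- ===== PORT A =====
-- Result of A's inner `for e in range(0, len(answer))` loop at one candidate start:
-- .found = the `return` fired; .brk = `break` or normal loop exit (try next candidate); .err = IndexError (caught: A returns (None, None)).
inductive PvTryRes : Type
  | found : PvTryRes
  | brk : PvTryRes
  | err : PvTryRes
deriving DecidableEq

-- inner loop: idx = s + e; the remaining answer tokens are `rest`; `e == len(answer) - 1` is `rest.tail = []`.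
def pvInner (para : List String) : Int → List String → PvTryRes
  | _, [] => .brk
  | idx, a :: rest =>
    match PySem.List.pyGet? para idx with
    | none => .err
    | some w =>
      if PySem.Str.lower w ≠ PySem.Str.lower a then .brk
      else match rest with
        | [] => .found
        | _ :: _ => pvInner para (idx + 1) rest

-- outer loop `for s in start`
def pvOuter (para answer : List String) : List Int → Option Int × Option Int
  | [] => (none, none)
  | s :: rest =>
    match pvInner para s answer with
    | .found => (some s, some (s + (answer.length : Int)))
    | .brk => pvOuter para answer rest
    | .err => (none, none)

def find_raw_answer_position (para : List String) (answer : List String) : Option Int × Option Int :=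
  match answer with
  | [] => (none, none)   -- Python: the comprehension raises IndexError unless para = [] (excluded by Pre_); with para = [] it returns (None, None)
  | a0 :: _ =>
    pvOuter para answer
      (((PySem.List.enumerate para 0).filter
          (fun p => PySem.Str.lower p.2 == PySem.Str.lower a0)).map (·.1))

-- ===== PORT B =====
def find_raw_answer_position_alt (para : List String) (answer : List String) : Option Int × Option Int :=
  let m := answer.length
  if m = 0 then (none, none)
  else
    let pl := para.map PySem.Str.lower
    let al := answer.map PySem.Str.lower
    match (PySem.List.pyRange 0 ((pl.length : Int) - (m : Int) + 1) 1).find?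
        (fun i => PySem.List.slice pl (some i) (some (i + (m : Int))) == al) with
    | some i => (some i, some (i + (m : Int)))
    | none => (none, none)

-- ===== PRECONDITION & SPEC =====
-- Pre_ excludes exactly the inputs where A raises IndexError (answer empty while para is non-empty: answer[0] is evaluated outside the try).
def Pre_find_raw_answer_position (para : List String) (answer : List String) : Prop :=
  answer ≠ [] ∨ para = []
instance (para : List String) (answer : List String) : Decidable (Pre_find_raw_answer_position para answer) := by unfold Pre_find_raw_answer_position; infer_instance

def pvWitness_find_raw_answer_position : List String × List String := (["a", "b"], ["B"])

def Spec_find_raw_answer_position (para : List String) (answer : List String) (out : Option Int × Option Int) : Prop := out = find_raw_answer_position_alt para answer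
instance (para : List String) (answer : List String) (out : Option Int × Option Int) : Decidable (Spec_find_raw_answer_position para answer out) := by unfold Spec_find_raw_answer_position; infer_instance

-- ===== CLAIM (what is proved, stated in full; the proofs are below) =====
def Claim_equal_find_raw_answer_position : Prop := ∀ (para : List String) (answer : List String), Dom_find_raw_answer_position para answer → Pre_find_raw_answer_position para answer → Spec_find_raw_answer_position para answer (find_raw_answer_position para answer)

-- ===== LEMMAS AND PROOFS =====

-- "the answer matches para at position i" (both sides lowercased)
def pvP (para answer : List String) (i : Nat) : Prop :=
  ((para.drop i).take answer.length).map PySem.Str.lower = answer.map PySem.Str.lower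

lemma pvQ_iff (para answer : List String) (k : Nat) :
    ((PySem.List.slice (para.map PySem.Str.lower) (some (k : Int))
        (some ((k : Int) + (answer.length : Int))) == answer.map PySem.Str.lower) = true)
      ↔ pvP para answer k := by
  unfold pvP
  rw [PySem.List.slice_natCast_add]
  simp only [beq_iff_eq, ← List.map_drop, ← List.map_take]

lemma pvInner_found_iff (para : List String) : ∀ (rest : List String) (s : Nat), rest ≠ [] →
    (pvInner para (s : Int) rest = .found ↔
      s + rest.length ≤ para.length ∧
      ((para.drop s).take rest.length).map PySem.Str.lower = rest.map PySem.Str.lower) := by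
  intro rest
  induction rest with
  | nil => intro s h; exact absurd rfl h
  | cons a rest ih =>
    intro s _
    rw [pvInner.eq_def]
    dsimp only
    rw [PySem.List.pyGet?_natCast]
    cases hs : para[s]? with
    | none =>
      rw [List.getElem?_eq_none_iff] at hs
      refine iff_of_false (by simp) ?_
      rintro ⟨h1, -⟩
      rw [List.length_cons] at h1
      omega
    | some w =>
      dsimp only
      have hsome := hs
      rw [List.getElem?_eq_some_iff] at hsome
      obtain ⟨hslt, hval⟩ := hsome
      have hdrop : para.drop s = w :: para.drop (s + 1) := by
        rw [List.drop_eq_getElem_cons hslt, hval]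
      by_cases hw : PySem.Str.lower w = PySem.Str.lower a
      · rw [if_neg (fun hcon => hcon hw)]
        cases rest with
        | nil =>
          dsimp only
          simp [hdrop, hw]
          omega
        | cons b rest' =>
          dsimp only
          have hcast : (s : Int) + 1 = ((s + 1 : Nat) : Int) := by push_cast; ring
          rw [hcast, ih (s + 1) (by simp), hdrop]
          simp only [List.length_cons, List.take_succ_cons, List.map_cons, List.cons.injEq,
            hw, true_and]
          constructor <;> rintro ⟨h1, h2⟩ <;> exact ⟨by omega, h2⟩
      · rw [if_pos hw]
        refine iff_of_false (by simp) ?_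
        rintro ⟨-, h2⟩
        rw [hdrop] at h2
        simp only [List.length_cons, List.take_succ_cons, List.map_cons, List.cons.injEq] at h2
        exact hw h2.1

lemma pvInner_err_bound (para : List String) : ∀ (rest : List String) (s : Nat),
    pvInner para (s : Int) rest = .err → para.length < s + rest.length := by
  intro rest
  induction rest with
  | nil => intro s h; simp [pvInner] at h
  | cons a rest ih =>
    intro s h
    rw [pvInner.eq_def] at h
    dsimp only at h
    rw [PySem.List.pyGet?_natCast] at h
    rw [List.length_cons]
    cases hs : para[s]? with
    | none =>
      rw [List.getElem?_eq_none_iff] at hs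
      omega
    | some w =>
      rw [hs] at h
      dsimp only at h
      by_cases hw : PySem.Str.lower w ≠ PySem.Str.lower a
      · rw [if_pos hw] at h; cases h
      · rw [if_neg hw] at h
        cases rest with
        | nil => dsimp only at h; cases h
        | cons b rest' =>
          dsimp only at h
          have hcast : (s : Int) + 1 = ((s + 1 : Nat) : Int) := by push_cast; ring
          rw [hcast] at h
          have hrec := ih (s + 1) h
          rw [List.length_cons] at hrec ⊢
          omega

lemma pvAlt_none (para answer : List String) (hne : answer ≠ [])
    (h : ∀ i : Nat, i + answer.length ≤ para.length → ¬ pvP para answer i) :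
    find_raw_answer_position_alt para answer = (none, none) := by
  have hm0 : ¬ answer.length = 0 := by simpa [List.length_eq_zero_iff] using hne
  simp only [find_raw_answer_position_alt, List.length_map, if_neg hm0]
  have hfind : List.find?
      (fun i => PySem.List.slice (List.map PySem.Str.lower para) (some i)
        (some (i + (answer.length : Int))) == List.map PySem.Str.lower answer)
      (PySem.List.pyRange 0 ((para.length : Int) - (answer.length : Int) + 1) 1) = none := by
    apply List.find?_eq_none.mpr
    intro x hx
    rw [PySem.List.mem_pyRange_one] at hx
    obtain ⟨hx0, hxlt⟩ := hx
    have hk : x = ((x.toNat : Nat) : Int) := (Int.toNat_of_nonneg hx0).symm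
    rw [hk]
    intro hq
    have hkm : x.toNat + answer.length ≤ para.length := by omega
    exact h x.toNat hkm ((pvQ_iff para answer x.toNat).mp hq)
  rw [hfind]

lemma pvAlt_some (para answer : List String) (hne : answer ≠ []) (s : Nat)
    (hle : s + answer.length ≤ para.length) (hP : pvP para answer s)
    (hmin : ∀ j : Nat, j < s → ¬ pvP para answer j) :
    find_raw_answer_position_alt para answer
      = (some (s : Int), some ((s : Int) + (answer.length : Int))) := by
  have hm0 : ¬ answer.length = 0 := by simpa [List.length_eq_zero_iff] using hne
  simp only [find_raw_answer_position_alt, List.length_map, if_neg hm0]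
  have hsK : (s : Int) < (para.length : Int) - (answer.length : Int) + 1 := by omega
  rw [PySem.List.pyRange_one_append 0 (s : Int) ((para.length : Int) - (answer.length : Int) + 1)
    (by positivity) (le_of_lt hsK)]
  rw [List.find?_append]
  have h1 : List.find?
      (fun i => PySem.List.slice (List.map PySem.Str.lower para) (some i)
        (some (i + (answer.length : Int))) == List.map PySem.Str.lower answer)
      (PySem.List.pyRange 0 (s : Int) 1) = none := by
    apply List.find?_eq_none.mpr
    intro x hx
    rw [PySem.List.mem_pyRange_one] at hx
    obtain ⟨hx0, hxlt⟩ := hx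
    have hk : x = ((x.toNat : Nat) : Int) := (Int.toNat_of_nonneg hx0).symm
    rw [hk]
    intro hq
    exact hmin x.toNat (by omega) ((pvQ_iff para answer x.toNat).mp hq)
  rw [h1, Option.none_or, PySem.List.pyRange_one_cons hsK,
    List.find?_cons_of_pos (p := fun i => PySem.List.slice (List.map PySem.Str.lower para) (some i)
      (some (i + (answer.length : Int))) == List.map PySem.Str.lower answer)
      ((pvQ_iff para answer s).mpr hP)]

lemma pvOuter_eq (para answer : List String) (hne : answer ≠ []) :
    ∀ L : List Int, (∀ x ∈ L, 0 ≤ x) → L.Pairwise (· < ·) →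
      (∀ i : Nat, i + answer.length ≤ para.length → pvP para answer i → (i : Int) ∈ L) →
      pvOuter para answer L = find_raw_answer_position_alt para answer := by
  intro L
  induction L with
  | nil =>
    intro _ _ hcomp
    have hno : ∀ i : Nat, i + answer.length ≤ para.length → ¬ pvP para answer i := by
      intro i hi hPi
      simpa using hcomp i hi hPi
    rw [pvAlt_none para answer hne hno]
    rfl
  | cons x rest ih =>
    intro hnn hpair hcomp
    have hx0 : 0 ≤ x := hnn x (by simp)
    have hxk : x = ((x.toNat : Nat) : Int) := (Int.toNat_of_nonneg hx0).symm
    have hrest : ∀ y ∈ rest, x < y := by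
      intro y hy; exact (List.pairwise_cons.mp hpair).1 y hy
    simp only [pvOuter]
    cases hres : pvInner para x answer with
    | found =>
      have hfd := hres
      rw [hxk, pvInner_found_iff para answer x.toNat hne] at hfd
      obtain ⟨hle, hPx⟩ := hfd
      have hmin : ∀ j : Nat, j < x.toNat → ¬ pvP para answer j := by
        intro j hj hPj
        have hmem := hcomp j (by omega) hPj
        rcases List.mem_cons.mp hmem with hh | hh
        · omega
        · have := hrest _ hh; omega
      dsimp only
      rw [pvAlt_some para answer hne x.toNat hle hPx hmin, Int.toNat_of_nonneg hx0]
    | brk =>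
      dsimp only
      apply ih (fun y hy => hnn y (List.mem_cons_of_mem _ hy)) (List.pairwise_cons.mp hpair).2
      intro i hi hPi
      have hmem := hcomp i hi hPi
      rcases List.mem_cons.mp hmem with hh | hh
      · exfalso
        have hfound : pvInner para ((i : Nat) : Int) answer = .found := by
          rw [pvInner_found_iff para answer i hne]
          exact ⟨hi, hPi⟩
        rw [hh] at hfound
        rw [hfound] at hres
        cases hres
      · exact hh
    | err =>
      have hb := hres
      rw [hxk] at hb
      have hbound := pvInner_err_bound para answer x.toNat hb
      have hno : ∀ i : Nat, i + answer.length ≤ para.length → ¬ pvP para answer i := by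
        intro i hi hPi
        have hmem := hcomp i hi hPi
        rcases List.mem_cons.mp hmem with hh | hh
        · omega
        · have := hrest _ hh; omega
      dsimp only
      rw [pvAlt_none para answer hne hno]

-- ===== VERDICT (by name: the statement is the Claim_ definition above) =====
theorem find_raw_answer_position_spec : Claim_equal_find_raw_answer_position := by
  intro para answer _ hpre
  unfold Spec_find_raw_answer_position
  cases answer with
  | nil => rfl
  | cons a0 tl =>
    simp only [find_raw_answer_position]
    apply pvOuter_eq para (a0 :: tl) (by simp)
    · intro x hx
      rcases List.mem_map.mp hx with ⟨p, hp, hpx⟩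
      rcases (PySem.List.mem_enumerate_iff para 0 p).mp (List.mem_filter.mp hp).1 with ⟨k, hk, hpk⟩
      subst hpk
      simp only [← hpx]
      omega
    · exact List.Pairwise.map _ (fun a b h => h)
        (List.Pairwise.filter _ (PySem.List.pairwise_lt_enumerate para 0))
    · intro i hi hPi
      have hilt : i < para.length := by
        rw [List.length_cons] at hi; omega
      have hhead : PySem.Str.lower para[i] = PySem.Str.lower a0 := by
        unfold pvP at hPi
        rw [List.drop_eq_getElem_cons hilt] at hPi
        simp only [List.length_cons, List.take_succ_cons, List.map_cons, List.cons.injEq] at hPi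
        exact hPi.1
      apply List.mem_map.mpr
      refine ⟨((i : Int), para[i]), ?_, rfl⟩
      apply List.mem_filter.mpr
      constructor
      · exact (PySem.List.mem_enumerate_iff para 0 _).mpr ⟨i, hilt, by simp⟩
      · simpa using hhead
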